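-- pv_equiv track=rewrite | github.com/hirokik0811/ec503 | Facenet/utility.py | get_smallist
-- ===== SOURCE A (Python) =====
-- def get_smallist(a):
--     l = len(a)
--     num = 0
--     m = a[num]
--     for i in range(l-1):
--         if a[i+1] < m and a[i+1] != 0:
--             m = a[i+1]
--             num = i+1
--     return num
-- ===== SOURCE B (Python) =====
-- def get_smallist(a):
--     first = a[0]
--     cand = [i for i in range(1, len(a)) if a[i] != 0 and a[i] < first]
--     if not cand:
--         return 0
--     return min(cand, key=lambda i: a[i])
-- ===== Notes on version B (the rewrite author's own statement) =====
-- stated objective: alternative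
-- what changed: Replaces A's single running-min scan with running best index by a filter pass over the indices followed by a first-minimum reduce (min with key) over the candidate list.
import Mathlib
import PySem

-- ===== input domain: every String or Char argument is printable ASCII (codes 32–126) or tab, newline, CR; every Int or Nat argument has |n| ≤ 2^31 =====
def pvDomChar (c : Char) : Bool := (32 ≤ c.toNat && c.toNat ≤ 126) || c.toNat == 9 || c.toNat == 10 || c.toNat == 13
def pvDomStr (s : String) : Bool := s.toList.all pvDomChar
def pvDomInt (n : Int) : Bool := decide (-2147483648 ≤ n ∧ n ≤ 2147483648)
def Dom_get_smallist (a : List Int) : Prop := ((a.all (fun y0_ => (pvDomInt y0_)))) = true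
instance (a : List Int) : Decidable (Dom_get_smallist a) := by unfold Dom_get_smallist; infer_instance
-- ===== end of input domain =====

-- B replaces A's running-min scan with a filter over indices followed by a first-minimum
-- reduce (Python min with key); same O(n) cost, different decomposition (objective: alternative).


-- ===== PORT A =====
def get_smallist (a : List Int) : Int :=
  let l : Int := a.length
  let num : Int := 0
  let m : Int := PySem.List.pyGetD a num 0    -- index num of a; in range under Pre_
  let st := (PySem.List.pyRange 0 (l - 1) 1).foldl
    (fun (s : Int × Int) i =>
      if PySem.List.pyGetD a (i + 1) 0 < s.1 ∧ PySem.List.pyGetD a (i + 1) 0 ≠ 0 then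
        (PySem.List.pyGetD a (i + 1) 0, i + 1)
      else s)
    (m, num)
  st.2

-- ===== PORT B =====
def get_smallist_alt (a : List Int) : Int :=
  let first : Int := PySem.List.pyGetD a 0 0   -- index 0 of a; in range under Pre_
  let cand : List Int := (PySem.List.pyRange 1 a.length 1).filter
    (fun i => decide (PySem.List.pyGetD a i 0 ≠ 0) && decide (PySem.List.pyGetD a i 0 < first))
  match cand with
  | [] => 0
  | _ => (PySem.List.min? cand (fun i => PySem.List.pyGetD a i 0)).getD 0

-- ===== PRECONDITION & SPEC =====
-- Pre_ excludes only the empty list, on which A raises IndexError reading the first element.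
def Pre_get_smallist (a : List Int) : Prop := a ≠ []
instance (a : List Int) : Decidable (Pre_get_smallist a) := by unfold Pre_get_smallist; infer_instance
def pvWitness_get_smallist : List Int := [3, 0, 2, 2, -1]
def Spec_get_smallist (a : List Int) (out : Int) : Prop := out = get_smallist_alt a
instance (a : List Int) (out : Int) : Decidable (Spec_get_smallist a out) := by unfold Spec_get_smallist; infer_instance

-- ===== CLAIM (what is proved, stated in full; the proofs are below) =====
def Claim_equal_get_smallist : Prop := ∀ (a : List Int), Dom_get_smallist a → Pre_get_smallist a → Spec_get_smallist a (get_smallist a)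

-- ===== LEMMAS AND PROOFS =====

-- the main invariant: after scanning indices 0..n-1 (A reads a[i+1]), the pair (m, num)
-- equals the first-minimum of the filtered candidate indices 1..n (B's computation).
theorem scan_eq_min (a : List Int) (n : ℕ) :
    ((PySem.List.pyRange 0 (n : Int) 1).foldl
      (fun (s : Int × Int) i =>
        if PySem.List.pyGetD a (i + 1) 0 < s.1 ∧ PySem.List.pyGetD a (i + 1) 0 ≠ 0 then
          (PySem.List.pyGetD a (i + 1) 0, i + 1)
        else s)
      (PySem.List.pyGetD a 0 0, 0))
    =
    (match PySem.List.min?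
        ((PySem.List.pyRange 1 ((n : Int) + 1) 1).filter
          (fun i => decide (PySem.List.pyGetD a i 0 ≠ 0) &&
                    decide (PySem.List.pyGetD a i 0 < PySem.List.pyGetD a 0 0)))
        (fun i => PySem.List.pyGetD a i 0) with
      | none => (PySem.List.pyGetD a 0 0, 0)
      | some j => (PySem.List.pyGetD a j 0, j)) := by
  induction n with
  | zero =>
      rw [PySem.List.pyRange_one_eq_nil (by norm_num), PySem.List.pyRange_one_eq_nil (by norm_num)]
      simp [PySem.List.min?]
  | succ n ih =>
      have h1 : ((n + 1 : ℕ) : Int) = (n : Int) + 1 := by push_cast; ring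
      rw [h1, PySem.List.pyRange_one_succ_right (by positivity),
          PySem.List.pyRange_one_succ_right (by omega : (1 : Int) ≤ (n : Int) + 1),
          List.foldl_append, List.filter_append, ih]
      set key : Int → Int := fun i => PySem.List.pyGetD a i 0 with hkey
      set P : Int → Bool := fun i => decide (key i ≠ 0) && decide (key i < key 0) with hP
      set cand := (PySem.List.pyRange 1 ((n : Int) + 1) 1).filter P with hcand
      by_cases hp : P ((n : Int) + 1)
      · -- new index is a candidate
        simp only [List.filter_cons, List.filter_nil, hp, if_pos]
        have hp' : key ((n : Int) + 1) ≠ 0 ∧ key ((n : Int) + 1) < key 0 := by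
          have := hp; simp [hP] at this; exact this
        cases hm : PySem.List.min? cand key with
        | none =>
            simp only [List.foldl_cons, List.foldl_nil]
            have : PySem.List.min? (cand ++ [(n : Int) + 1]) key = some ((n : Int) + 1) := by
              simp only [PySem.List.min?] at hm ⊢
              rw [List.foldl_append, hm]
              rfl
            rw [this, if_pos ⟨hp'.2, hp'.1⟩]
        | some j =>
            have hj : j ∈ cand := PySem.List.min?_mem hm
            have hjP : key j ≠ 0 ∧ key j < key 0 := by
              have := (List.mem_filter.mp hj).2; simp [hP] at this; exact this
            simp only [List.foldl_cons, List.foldl_nil]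
            have hmin : PySem.List.min? (cand ++ [(n : Int) + 1]) key
                = if key ((n : Int) + 1) < key j then some ((n : Int) + 1) else some j := by
              simp only [PySem.List.min?] at hm ⊢
              rw [List.foldl_append, hm]; simp
            rw [hmin]
            by_cases hlt : key ((n : Int) + 1) < key j
            · rw [if_pos hlt, if_pos ⟨hlt, hp'.1⟩]
            · rw [if_neg hlt, if_neg (fun h => hlt h.1)]
      · -- new index is not a candidate: neither side changes
        simp only [List.filter_cons, List.filter_nil, hp, if_neg, Bool.false_eq_true,
          not_false_eq_true, List.append_nil]
        have hp' : ¬ (key ((n : Int) + 1) ≠ 0 ∧ key ((n : Int) + 1) < key 0) := by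
          intro h; exact hp (by simp [hP, h.1, h.2])
        cases hm : PySem.List.min? cand key with
        | none =>
            simp only [List.foldl_cons, List.foldl_nil]
            have h2 : ¬ (key ((n : Int) + 1) < key 0 ∧ key ((n : Int) + 1) ≠ 0) := by
              intro h; exact hp' ⟨h.2, h.1⟩
            rw [if_neg h2]
        | some j =>
            have hj : j ∈ cand := PySem.List.min?_mem hm
            have hjP : key j ≠ 0 ∧ key j < key 0 := by
              have := (List.mem_filter.mp hj).2; simp [hP] at this; exact this
            simp only [List.foldl_cons, List.foldl_nil]
            have h2 : ¬ (key ((n : Int) + 1) < key j ∧ key ((n : Int) + 1) ≠ 0) := by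
              intro h; exact hp' ⟨h.2, by linarith [hjP.2]⟩
            rw [if_neg h2]

-- ===== VERDICT (by name: the statement is the Claim_ definition above) =====
theorem get_smallist_spec : Claim_equal_get_smallist := by
  intro a _ hne
  unfold Spec_get_smallist get_smallist get_smallist_alt
  have hlen : 1 ≤ a.length := List.length_pos_iff.mpr hne
  have hl2 : (a.length : Int) = ((a.length - 1 : ℕ) : Int) + 1 := by push_cast [hlen]; ring
  simp only [hl2, add_sub_cancel_right]
  rw [scan_eq_min a (a.length - 1)]
  cases hc : (PySem.List.pyRange 1 (((a.length - 1 : ℕ) : Int) + 1) 1).filter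
      (fun i => decide (PySem.List.pyGetD a i 0 ≠ 0) &&
                decide (PySem.List.pyGetD a i 0 < PySem.List.pyGetD a 0 0)) with
  | nil =>
      rfl
  | cons x t =>
      cases hm : PySem.List.min? (x :: t) (fun i => PySem.List.pyGetD a i 0) with
      | none => exact absurd ((PySem.List.min?_eq_none_iff _ _).mp hm) (by simp)
      | some j => simp
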